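-- pv_equiv track=rewrite | github.com/MadCom96/Study | algorithm_problems/Programmers/prog.[1차]캐시.py | solution
-- ===== SOURCE A (Python) =====
-- def solution(cacheSize, cities):
--     cache = []
--     time = 0
--     for city in cities:
--         city = city.lower()
--
--         cache.append(city)
--         idx = cache.index(city)
--         if idx != len(cache)-1: # 안에 있을때
--             time += 1
--             cache.pop(idx)
--         else: # 안에 없을 때
--             time += 5
--             if len(cache) > cacheSize:
--                 cache.pop(0)
--     return time
-- ===== SOURCE B (Python) =====
-- def solution(cacheSize, cities):
--     # LRU as a timestamp map: lowercased city -> last-use clock tick;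
--     # eviction scans for the minimum timestamp.
--     last_used = {}
--     t = 0
--     time = 0
--     for city in cities:
--         city = city.lower()
--         t += 1
--         if city in last_used:
--             time += 1
--             last_used[city] = t
--         else:
--             time += 5
--             last_used[city] = t
--             if len(last_used) > cacheSize:
--                 victim = min(last_used, key=last_used.get)
--                 del last_used[victim]
--     return time
-- ===== Notes on version B (the rewrite author's own statement) =====
-- stated objective: alternative
-- what changed: A simulates the LRU cache as a recency-ordered list (append, linear .index scan, pop to move-to-end / pop(0) to evict); B instead keeps a dict mapping lowercased city to its last-use clock tick and evicts by scanning for the minimum timestamp, never maintaining any order.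
import Mathlib
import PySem

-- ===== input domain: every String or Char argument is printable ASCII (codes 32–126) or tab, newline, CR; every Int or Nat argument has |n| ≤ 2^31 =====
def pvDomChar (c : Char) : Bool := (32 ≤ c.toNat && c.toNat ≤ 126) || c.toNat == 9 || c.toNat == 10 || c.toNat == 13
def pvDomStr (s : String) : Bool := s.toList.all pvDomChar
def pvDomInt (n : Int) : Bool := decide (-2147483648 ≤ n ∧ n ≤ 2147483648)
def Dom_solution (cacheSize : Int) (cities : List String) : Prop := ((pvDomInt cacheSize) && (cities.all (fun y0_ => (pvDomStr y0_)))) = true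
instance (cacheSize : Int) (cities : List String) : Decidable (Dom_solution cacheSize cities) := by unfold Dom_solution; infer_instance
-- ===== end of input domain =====

-- B replaces A's order-maintained cache list (linear .index scan and move-to-end) by a
-- timestamp dictionary with a minimum-timestamp scan on eviction (alternative data structure).

-- ===== PORT A =====
-- one iteration of A's for-loop; state = (cache list, accumulated time)
def solution_step (cacheSize : Int) (st : List String × Int) (city : String) : List String × Int :=
  let c := PySem.Str.lower city
  let cache := st.1 ++ [c]
  let idx : Nat := (PySem.List.index? cache c).getD 0
  if (idx : Int) ≠ PySem.List.len cache - 1 then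
    (cache.eraseIdx idx, st.2 + 1)
  else
    if PySem.List.len cache > cacheSize then
      (cache.eraseIdx 0, st.2 + 5)
    else
      (cache, st.2 + 5)

def solution (cacheSize : Int) (cities : List String) : Int :=
  (cities.foldl (solution_step cacheSize) ([], 0)).2

-- ===== PORT B =====
-- one iteration of B's for-loop; state = (last_used dict, clock t, accumulated time)
def solution_alt_step (cacheSize : Int) (st : PySem.Dict String Int × Int × Int) (city : String) : PySem.Dict String Int × Int × Int :=
  let c := PySem.Str.lower city
  let t := st.2.1 + 1
  if st.1.contains c then
    (st.1.insert c t, t, st.2.2 + 1)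
  else
    let d := st.1.insert c t
    if (PySem.Dict.size d : Int) > cacheSize then
      let victim := PySem.List.minD d.keys (fun k => d.getD k 0) ""
      (d.erase victim, t, st.2.2 + 5)
    else
      (d, t, st.2.2 + 5)

def solution_alt (cacheSize : Int) (cities : List String) : Int :=
  (cities.foldl (solution_alt_step cacheSize) (PySem.Dict.empty, 0, 0)).2.2

-- ===== PRECONDITION & SPEC =====
def Spec_solution (cacheSize : Int) (cities : List String) (out : Int) : Prop := out = solution_alt cacheSize cities
instance (cacheSize : Int) (cities : List String) (out : Int) : Decidable (Spec_solution cacheSize cities out) := by unfold Spec_solution; infer_instance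

-- ===== CLAIM (what is proved, stated in full; the proofs are below) =====
def Claim_equal_solution : Prop := ∀ (cacheSize : Int) (cities : List String), Dom_solution cacheSize cities → Spec_solution cacheSize cities (solution cacheSize cities)

-- ===== LEMMAS AND PROOFS =====

-- coupling invariant between A's cache list and B's (dict, clock) state: the dict's keys are
-- exactly the cached cities, their timestamps strictly increase along the cache list
-- (head = least recently used) and are bounded by the clock
def InvLRU (cache : List String) (d : PySem.Dict String Int) (t : Int) : Prop :=
  cache.Nodup ∧ d.keys.Perm cache ∧
  (cache.map (fun x => d.getD x 0)).Pairwise (· < ·) ∧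
  (∀ x ∈ cache, d.getD x 0 ≤ t)

lemma eraseIdx_append_length {α : Type} (pre suf : List α) (c : α) :
    (pre ++ c :: suf).eraseIdx pre.length = pre ++ suf := by
  induction pre with
  | nil => rfl
  | cons a l ih => simpa using ih

lemma min?_aux {α κ : Type} [LT κ] [DecidableLT κ] (key : α → κ) :
    ∀ (xs : List α) (a : α),
    (xs.foldl (fun acc x => match acc with
      | none => some x
      | some m => if key x < key m then some x else some m) (some a)).isSome := by
  intro xs
  induction xs with
  | nil => intro a; rfl
  | cons x xs ih => intro a; simp only [List.foldl_cons]; split <;> apply ih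

lemma min?_isSome_of_ne_nil {α κ : Type} [LT κ] [DecidableLT κ] (xs : List α) (key : α → κ)
    (h : xs ≠ []) : (PySem.List.min? xs key).isSome := by
  obtain ⟨a, tl, rfl⟩ := List.exists_cons_of_ne_nil h
  simp only [PySem.List.min?, List.foldl_cons]
  exact min?_aux key tl a

lemma min?_eq_of_unique_min {α κ : Type} [LinearOrder κ] (xs : List α) (key : α → κ) (x : α)
    (hx : x ∈ xs) (huniq : ∀ y ∈ xs, y ≠ x → key x < key y) :
    PySem.List.min? xs key = some x := by
  have hne : xs ≠ [] := List.ne_nil_of_mem hx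
  obtain ⟨m, hm⟩ := Option.isSome_iff_exists.mp (min?_isSome_of_ne_nil xs key hne)
  have hmem := PySem.List.min?_mem hm
  have hmin := PySem.List.min?_isMin hm x hx
  by_cases hmx : m = x
  · rw [hm, hmx]
  · exact absurd (huniq m hmem hmx) (not_lt.mpr hmin)

lemma keys_erase (d : PySem.Dict String Int) (k : String) :
    (d.erase k).keys = d.keys.filter (fun x => x ≠ k) := by
  show (d.items.filter _).map _ = (d.items.map _).filter _
  induction d.items with
  | nil => rfl
  | cons p ps ih =>
    by_cases hp : p.1 = k <;>
      simp [List.filter_cons, List.map_cons, hp, ih]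


lemma find?_filter_ne (items : List (String × Int)) (k x : String) (h : x ≠ k) :
    List.find? (fun p => p.1 == x) (items.filter (fun p => !(p.1 == k)))
      = List.find? (fun p => p.1 == x) items := by
  induction items with
  | nil => rfl
  | cons p ps ih =>
    by_cases hp : p.1 = k
    · have hpx : (p.1 == x) = false := by simp [hp, Ne.symm h]
      have hkx : (k == x) = false := by simp [Ne.symm h]
      simp [List.filter_cons, hp, List.find?_cons, hpx, hkx, ih]
    · by_cases hx : p.1 = x
      · simp [List.filter_cons, hp, List.find?_cons, hx, h]
      · simp [List.filter_cons, hp, List.find?_cons, hx, ih]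

lemma getD_erase_of_ne (d : PySem.Dict String Int) (k x : String) (h : x ≠ k) (d0 : Int) :
    (d.erase k).getD x d0 = d.getD x d0 := by
  simp only [PySem.Dict.getD, PySem.Dict.get?, PySem.Dict.erase]
  rw [find?_filter_ne _ _ _ h]

lemma size_eq_keys_length (d : PySem.Dict String Int) : d.size = d.keys.length := by
  simp [PySem.Dict.size, PySem.Dict.keys]

-- one loop iteration preserves the coupling; both sides add the same time and B's clock becomes t+1
lemma step_sim (cacheSize : Int) (cache : List String) (d : PySem.Dict String Int)
    (t time : Int) (city : String) (h : InvLRU cache d t) :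
    InvLRU (solution_step cacheSize (cache, time) city).1
           (solution_alt_step cacheSize (d, t, time) city).1
           (t + 1)
    ∧ (solution_alt_step cacheSize (d, t, time) city).2.1 = t + 1
    ∧ (solution_step cacheSize (cache, time) city).2
        = (solution_alt_step cacheSize (d, t, time) city).2.2 := by
  obtain ⟨hnd, hperm, hpw, hbd⟩ := h
  set c := PySem.Str.lower city with hc
  have hcont_iff : d.contains c = true ↔ c ∈ cache := by
    rw [PySem.Dict.contains_iff_mem_keys]; exact hperm.mem_iff
  by_cases hmem : c ∈ cache
  · -- HIT
    have hcont : d.contains c = true := hcont_iff.mpr hmem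
    obtain ⟨k, hk⟩ := Option.isSome_iff_exists.mp ((PySem.List.index?_isSome_iff cache c).mpr hmem)
    obtain ⟨pre, suf, hdecomp, hklen, hcpre⟩ := (PySem.List.index?_eq_some_iff _ _ _).mp hk
    have hklt : k < cache.length := by subst hdecomp hklen; simp
    have hidx : PySem.List.index? (cache ++ [c]) c = some k :=
      (PySem.List.index?_append_of_mem [c] hmem).trans hk
    have hsplit : cache ++ [c] = pre ++ c :: (suf ++ [c]) := by rw [hdecomp]; simp
    have hlen1 : (cache ++ [c]).length = cache.length + 1 := by simp
    have hA : solution_step cacheSize (cache, time) city = (pre ++ suf ++ [c], time + 1) := by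
      simp only [solution_step, ← hc, hidx, Option.getD_some, PySem.List.len_eq]
      rw [if_pos (by rw [hlen1]; push_cast; omega)]
      rw [hsplit, ← hklen, eraseIdx_append_length]
      simp
    have hB : solution_alt_step cacheSize (d, t, time) city
        = (d.insert c (t + 1), t + 1, time + 1) := by
      simp only [solution_alt_step, ← hc, hcont, if_pos]
    rw [hA, hB]
    have hpermN : cache.Perm (pre ++ suf ++ [c]) := by
      rw [hdecomp]
      exact List.perm_middle.trans (List.perm_append_singleton c (pre ++ suf)).symm
    have hnd2 : (c :: (pre ++ suf)).Nodup := by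
      rw [hdecomp] at hnd; exact List.perm_middle.nodup hnd
    have hcnotin : c ∉ pre ++ suf := (List.nodup_cons.mp hnd2).1
    have hsubmem : ∀ x ∈ pre ++ suf, x ∈ cache := by
      intro x hx; rw [hdecomp]
      rcases List.mem_append.mp hx with h1 | h1
      · exact List.mem_append.mpr (Or.inl h1)
      · exact List.mem_append.mpr (Or.inr (List.mem_cons_of_mem _ h1))
    have hmap : (pre ++ suf ++ [c]).map (fun x => (d.insert c (t + 1)).getD x 0)
        = (pre ++ suf).map (fun x => d.getD x 0) ++ [t + 1] := by
      rw [List.map_append]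
      congr 1
      · apply List.map_congr_left
        intro x hx
        rw [PySem.Dict.getD_insert]
        refine if_neg (fun hxc => hcnotin ?_)
        rw [← hxc]; exact hx
      · simp [PySem.Dict.getD_insert]
    refine ⟨⟨?_, ?_, ?_, ?_⟩, rfl, rfl⟩
    · exact hpermN.nodup hnd
    · rw [PySem.Dict.keys_insert_of_contains d (t + 1) hcont]
      exact hperm.trans hpermN
    · rw [hmap]
      refine List.pairwise_append.mpr ⟨?_, List.pairwise_singleton _ _, ?_⟩
      · refine List.Pairwise.sublist (List.Sublist.map _ ?_) hpw
        rw [hdecomp]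
        exact List.Sublist.append_left (List.sublist_cons_self c suf) pre
      · intro a ha b hb
        simp only [List.mem_singleton] at hb
        obtain ⟨x, hx, rfl⟩ := List.mem_map.mp ha
        have := hbd x (hsubmem x hx)
        omega
    · intro x hx
      rw [PySem.Dict.getD_insert]
      by_cases hxc : x = c
      · rw [if_pos hxc]
      · rw [if_neg hxc]
        rcases List.mem_append.mp hx with h1 | h1
        · exact le_trans (hbd x (hsubmem x h1)) (by omega)
        · simp only [List.mem_singleton] at h1; exact absurd h1 hxc
  · -- MISS
    have hcontf : d.contains c = false := by
      cases hb : d.contains c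
      · rfl
      · exact absurd (hcont_iff.mp hb) hmem
    have hidx : PySem.List.index? (cache ++ [c]) c = some cache.length :=
      PySem.List.index?_append_singleton_self cache c hmem
    have hlen1 : (cache ++ [c]).length = cache.length + 1 := by simp
    set d' := d.insert c (t + 1) with hd'
    have hkeys' : d'.keys = d.keys ++ [c] :=
      PySem.Dict.keys_insert_of_not_contains d (t + 1) hcontf
    have hpermL : d'.keys.Perm (cache ++ [c]) := by
      rw [hkeys']; exact hperm.append_right [c]
    have hsz : (PySem.Dict.size d' : Int) = (cache.length : Int) + 1 := by
      rw [size_eq_keys_length, hpermL.length_eq, hlen1]; push_cast; ring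
    have hnotc : ∀ x ∈ cache, x ≠ c := fun x hx hxc => hmem (hxc ▸ hx)
    have hndL : (cache ++ [c]).Nodup :=
      (List.perm_append_singleton c cache).symm.nodup (List.nodup_cons.mpr ⟨hmem, hnd⟩)
    have hmap : (cache ++ [c]).map (fun x => d'.getD x 0)
        = cache.map (fun x => d.getD x 0) ++ [t + 1] := by
      rw [List.map_append]
      congr 1
      · apply List.map_congr_left
        intro x hx
        rw [hd', PySem.Dict.getD_insert]
        exact if_neg (hnotc x hx)
      · simp [hd', PySem.Dict.getD_insert]
    have hpwL : ((cache ++ [c]).map (fun x => d'.getD x 0)).Pairwise (· < ·) := by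
      rw [hmap]
      refine List.pairwise_append.mpr ⟨hpw, List.pairwise_singleton _ _, ?_⟩
      intro a ha b hb
      simp only [List.mem_singleton] at hb
      obtain ⟨x, hx, rfl⟩ := List.mem_map.mp ha
      have := hbd x hx
      omega
    have hbdL : ∀ x ∈ cache ++ [c], d'.getD x 0 ≤ t + 1 := by
      intro x hx
      rw [hd', PySem.Dict.getD_insert]
      by_cases hxc : x = c
      · rw [if_pos hxc]
      · rw [if_neg hxc]
        rcases List.mem_append.mp hx with h1 | h1
        · exact le_trans (hbd x h1) (by omega)
        · simp only [List.mem_singleton] at h1; exact absurd h1 hxc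
    by_cases hbig : (cache.length : Int) + 1 > cacheSize
    · -- evict
      obtain ⟨hd0, tl, hL⟩ := List.exists_cons_of_ne_nil (show cache ++ [c] ≠ [] by simp)
      have hA : solution_step cacheSize (cache, time) city = (tl, time + 5) := by
        simp only [solution_step, ← hc, hidx, Option.getD_some, PySem.List.len_eq]
        rw [if_neg (by rw [hlen1]; push_cast; omega), if_pos (by rw [hlen1]; push_cast; omega)]
        rw [hL, List.eraseIdx_cons_zero]
      have hd0mem : hd0 ∈ d'.keys := hpermL.mem_iff.mpr (by rw [hL]; exact List.mem_cons_self)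
      have hpwcons : ∀ b ∈ tl.map (fun x => d'.getD x 0), d'.getD hd0 0 < b := by
        have := hpwL
        rw [hL, List.map_cons] at this
        exact (List.pairwise_cons.mp this).1
      have hvic : PySem.List.minD d'.keys (fun k => d'.getD k 0) "" = hd0 := by
        have huniq : ∀ y ∈ d'.keys, y ≠ hd0 → d'.getD hd0 0 < d'.getD y 0 := by
          intro y hy hyne
          have hyL : y ∈ hd0 :: tl := by rw [← hL]; exact hpermL.mem_iff.mp hy
          rcases List.mem_cons.mp hyL with h1 | h1
          · exact absurd h1 hyne
          · exact hpwcons _ (List.mem_map.mpr ⟨y, h1, rfl⟩)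
        unfold PySem.List.minD
        rw [min?_eq_of_unique_min _ _ hd0 hd0mem huniq]
        rfl
      have hB : solution_alt_step cacheSize (d, t, time) city
          = (d'.erase hd0, t + 1, time + 5) := by
        simp only [solution_alt_step, ← hc, hcontf, Bool.false_eq_true, if_false, ← hd']
        rw [if_pos (by rw [hsz]; exact hbig), hvic]
      rw [hA, hB]
      have hndcons : hd0 ∉ tl ∧ tl.Nodup := List.nodup_cons.mp (by rw [← hL]; exact hndL)
      have htlne : ∀ x ∈ tl, x ≠ hd0 := fun x hx hxe => hndcons.1 (hxe ▸ hx)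
      refine ⟨⟨hndcons.2, ?_, ?_, ?_⟩, rfl, rfl⟩
      · rw [keys_erase]
        refine (hpermL.filter _).trans ?_
        rw [hL, List.filter_cons]
        simp only [ne_eq, not_true_eq_false, decide_false, Bool.false_eq_true, if_false]
        rw [List.filter_eq_self.mpr (fun x hx => by simpa using htlne x hx)]
      · have : tl.map (fun x => (d'.erase hd0).getD x 0) = tl.map (fun x => d'.getD x 0) :=
          List.map_congr_left (fun x hx => getD_erase_of_ne d' hd0 x (htlne x hx) 0)
        rw [this]
        have := hpwL
        rw [hL, List.map_cons] at this
        exact (List.pairwise_cons.mp this).2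
      · intro x hx
        rw [getD_erase_of_ne d' hd0 x (htlne x hx) 0]
        exact hbdL x (by rw [hL]; exact List.mem_cons_of_mem _ hx)
    · -- no evict
      have hA : solution_step cacheSize (cache, time) city = (cache ++ [c], time + 5) := by
        simp only [solution_step, ← hc, hidx, Option.getD_some, PySem.List.len_eq]
        rw [if_neg (by rw [hlen1]; push_cast; omega), if_neg (by rw [hlen1]; push_cast; omega)]
      have hB : solution_alt_step cacheSize (d, t, time) city = (d', t + 1, time + 5) := by
        simp only [solution_alt_step, ← hc, hcontf, Bool.false_eq_true, if_false, ← hd']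
        rw [if_neg (by rw [hsz]; exact hbig)]
      rw [hA, hB]
      exact ⟨⟨hndL, hpermL, hpwL, hbdL⟩, rfl, rfl⟩

lemma fold_sim (cacheSize : Int) (cities : List String) :
    ∀ (cache : List String) (d : PySem.Dict String Int) (t time : Int), InvLRU cache d t →
    (cities.foldl (solution_step cacheSize) (cache, time)).2
      = (cities.foldl (solution_alt_step cacheSize) (d, t, time)).2.2 := by
  induction cities with
  | nil => intro _ _ _ _ _; rfl
  | cons city rest ih =>
    intro cache d t time h
    obtain ⟨h1, h2, h3⟩ := step_sim cacheSize cache d t time city h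
    simp only [List.foldl_cons]
    have ha : solution_step cacheSize (cache, time) city
        = ((solution_step cacheSize (cache, time) city).1, (solution_step cacheSize (cache, time) city).2) := rfl
    have hb : solution_alt_step cacheSize (d, t, time) city
        = ((solution_alt_step cacheSize (d, t, time) city).1,
           (solution_alt_step cacheSize (d, t, time) city).2.1,
           (solution_alt_step cacheSize (d, t, time) city).2.2) := rfl
    rw [ha, hb, h2, h3]
    exact ih _ _ _ _ h1

-- ===== VERDICT (by name: the statement is the Claim_ definition above) =====
theorem solution_spec : Claim_equal_solution := by
  intro cacheSize cities _
  unfold Spec_solution solution solution_alt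
  exact fold_sim cacheSize cities [] PySem.Dict.empty 0 0
    ⟨List.nodup_nil, by simp [PySem.Dict.keys, PySem.Dict.empty], by simp, by simp⟩
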